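-- pv_equiv track=rewrite | github.com/Cheshta-Joshi/hubb_sim | hubbard_functions.py | spinless_basis
-- ===== SOURCE A (Python) =====
-- from itertools import combinations
--
-- def spinless_basis(N,r) :
--     '''
--     input = number of lattice sites (N), number of electrons (r)
--     output = list of basis [0110] example for N=4, r=2
--     '''
--     basis_set = []
--     lattice = list(range(N))
--     places = list(combinations(lattice, r))
--     for combination in places :
--         basis = [False] *N
--         for index in combination :
--             basis[index] = True
--         basis_set.append(basis)
--     return basis_set
-- ===== SOURCE B (Python) =====
-- def spinless_basis(N, r):
--     '''Iterative depth-first generation: walk the tree of occupied-site choices with an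
--     explicit stack (chosen), emitting each completed basis row built segment by segment.'''
--     if r < 0:
--         raise ValueError('r must be non-negative')
--     basis_set = []
--     chosen = []          # currently chosen sites, ascending
--     remaining = r        # electrons still to place
--     i = 0                # next candidate site
--     while True:
--         if remaining == 0:
--             row = []
--             prev = -1
--             for c in chosen:
--                 row += [False] * (c - prev - 1)
--                 row.append(True)
--                 prev = c
--             row += [False] * (N - prev - 1)
--             basis_set.append(row)
--             if not chosen:
--                 return basis_set
--             i = chosen.pop() + 1
--             remaining += 1
--         elif i <= N - remaining:
--             chosen.append(i)
--             i += 1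
--             remaining -= 1
--         else:
--             if not chosen:
--                 return basis_set
--             i = chosen.pop() + 1
--             remaining += 1
-- ===== Notes on version B (the rewrite author's own statement) =====
-- stated objective: alternative
-- what changed: Replaces the itertools.combinations enumeration plus per-combination index-setting pass by an iterative depth-first walk with an explicit stack of chosen sites that builds each boolean row segment by segment, never materialising the N-element lattice list or the list of combination tuples.
import Mathlib
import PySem

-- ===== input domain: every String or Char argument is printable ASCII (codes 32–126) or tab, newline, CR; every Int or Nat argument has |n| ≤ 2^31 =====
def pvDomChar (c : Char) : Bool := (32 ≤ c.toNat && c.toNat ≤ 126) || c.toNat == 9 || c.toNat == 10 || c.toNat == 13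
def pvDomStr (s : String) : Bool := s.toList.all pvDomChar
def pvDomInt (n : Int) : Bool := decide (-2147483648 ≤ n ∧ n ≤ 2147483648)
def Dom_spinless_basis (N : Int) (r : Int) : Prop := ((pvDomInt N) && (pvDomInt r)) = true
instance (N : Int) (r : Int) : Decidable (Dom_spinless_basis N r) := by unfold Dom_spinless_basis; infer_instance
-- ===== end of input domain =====

-- B replaces A's itertools.combinations enumeration + per-combination index-setting pass by an
-- iterative depth-first walk with an explicit stack that builds each row segment by segment,
-- skipping A's materialised lattice and combination lists (alternative decomposition).
-- Equivalence proved for 0 ≤ r (A raises ValueError otherwise).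

-- ===== PORT A =====
-- port of the library call itertools.combinations(pool, k): lexicographic order of positions
def combosA : List Int → Nat → List (List Int)
  | _, 0 => [[]]
  | [], _ + 1 => []
  | x :: xs, k + 1 => (combosA xs k).map (fun c => x :: c) ++ combosA xs (k + 1)

def spinless_basis (N : Int) (r : Int) : List (List Bool) :=
  let lattice := PySem.List.pyRange 0 N 1
  let places := combosA lattice r.toNat
  places.foldl
    (fun basis_set combination =>
      basis_set ++ [combination.foldl (fun basis index => basis.set index.toNat true)
                      (List.replicate N.toNat false)])
    []

-- ===== PORT B =====
-- fuel bound for B's while loop (the loop runs exactly this many iterations; proved below)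
def stepsB (n : Nat) (start rem : Nat) : Nat :=
  if rem = 0 then 1
  else if (start : Int) ≤ (n : Int) - (rem : Int) then
    1 + stepsB n (start + 1) (rem - 1) + stepsB n (start + 1) rem
  else 1
termination_by (rem, n - start)
decreasing_by
  · exact Prod.Lex.left _ _ (by omega)
  · exact Prod.Lex.right' _ (by omega) (by omega)

-- the emit step: build the row from the chosen sites (kept as a cons-stack, most recent first,
-- modelling Python's append/pop at the end; Python iterates ascending = our reverse)
def rowOfB (N : Int) (chosen : List Int) : List Bool :=
  let p := chosen.reverse.foldl
      (fun (st : List Bool × Int) c =>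
        (st.1 ++ List.replicate (c - st.2 - 1).toNat false ++ [true], c))
      ([], -1)
  p.1 ++ List.replicate (N - p.2 - 1).toNat false

-- the while loop: state (chosen, remaining, i, basis_set), one constructor step per iteration
def bloop (N : Int) : Nat → List Int → Int → Int → List (List Bool) → List (List Bool)
  | 0, _, _, _, acc => acc   -- fuel exhausted (unreachable: the fuel is exactly the step count)
  | fuel + 1, chosen, remaining, i, acc =>
    if remaining = 0 then
      let acc' := acc ++ [rowOfB N chosen]
      match chosen with
      | [] => acc'
      | c :: cs => bloop N fuel cs (remaining + 1) (c + 1) acc'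
    else if i ≤ N - remaining then
      bloop N fuel (i :: chosen) (remaining - 1) (i + 1) acc
    else
      match chosen with
      | [] => acc
      | c :: cs => bloop N fuel cs (remaining + 1) (c + 1) acc

def spinless_basis_alt (N : Int) (r : Int) : List (List Bool) :=
  bloop N (stepsB N.toNat 0 r.toNat) [] r 0 []

-- ===== PRECONDITION & SPEC =====
-- A raises ValueError (inside combinations) when r < 0; Pre_ excludes exactly those inputs.
def Pre_spinless_basis (N : Int) (r : Int) : Prop := 0 ≤ r
instance (N : Int) (r : Int) : Decidable (Pre_spinless_basis N r) := by
  unfold Pre_spinless_basis; infer_instance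
def pvWitness_spinless_basis : Int × Int := (4, 2)

def Spec_spinless_basis (N : Int) (r : Int) (out : List (List Bool)) : Prop := out = spinless_basis_alt N r
instance (N : Int) (r : Int) (out : List (List Bool)) : Decidable (Spec_spinless_basis N r out) := by unfold Spec_spinless_basis; infer_instance

-- ===== CLAIM (what is proved, stated in full; the proofs are below) =====
def Claim_equal_spinless_basis : Prop := ∀ (N : Int) (r : Int), Dom_spinless_basis N r → Pre_spinless_basis N r → Spec_spinless_basis N r (spinless_basis N r)

-- ===== LEMMAS AND PROOFS =====

-- recursive reference generator: the common shape both ports are reduced to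
def genB (N : Int) : Nat → Nat → List Bool → List (List Bool)
  | start, 0, row => [row ++ List.replicate (N.toNat - start) false]
  | start, rem + 1, row =>
      (List.range' start (N.toNat - rem - start)).flatMap
        (fun i => genB N (i + 1) rem (row ++ List.replicate (i - start) false ++ [true]))

theorem combosA_nil_of_short (l : List Int) (k : Nat) (h : l.length < k) :
    combosA l k = [] := by
  induction l generalizing k with
  | nil =>
      cases k with
      | zero => simp at h
      | succ k => rfl
  | cons x xs ih =>
      cases k with
      | zero => simp at h
      | succ k =>
          show (combosA xs k).map _ ++ combosA xs (k + 1) = []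
          rw [ih k (by simp at h; omega), ih (k + 1) (by simp at h; omega)]
          rfl

theorem combosA_zero (l : List Int) : combosA l 0 = [[]] := by cases l <;> rfl

def mkRange (s m : Nat) : List Int := (List.range' s m).map Int.ofNat

theorem combosA_range (m k s : Nat) :
    combosA (mkRange s m) (k + 1) =
      (List.range' s m).flatMap
        (fun i => (combosA (mkRange (i + 1) (s + m - i - 1)) k).map (fun c => (i : Int) :: c)) := by
  induction m generalizing s with
  | zero => rfl
  | succ m ih =>
      have h1 : mkRange s (m + 1) = (s : Int) :: mkRange (s + 1) m := by
        simp [mkRange, List.range'_succ]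
      rw [h1]
      show (combosA (mkRange (s + 1) m) k).map (fun c => (s : Int) :: c)
            ++ combosA (mkRange (s + 1) m) (k + 1) = _
      rw [List.range'_succ, List.flatMap_cons]
      have h2 : s + (m + 1) = (s + 1) + m := by omega
      rw [h2, ih (s + 1)]
      rw [show s + 1 + m - s - 1 = m from by omega]

theorem replicate_set (m j : Nat) (h : j < m) :
    (List.replicate m false).set j true =
      List.replicate j false ++ true :: List.replicate (m - j - 1) false := by
  induction j generalizing m with
  | zero =>
      cases m with
      | zero => omega
      | succ m => simp [List.replicate_succ]
  | succ j ih =>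
      cases m with
      | zero => omega
      | succ m =>
          simp only [List.replicate_succ, List.set_cons_succ, ih m (by omega)]
          simp

-- key invariant: genB from (start, rem, row) matches A's fold over combosA of the suffix range
theorem genB_eq (rem : Nat) (N : Int) :
    ∀ (start : Nat) (row : List Bool), row.length = start → start ≤ N.toNat →
    genB N start rem row =
      (combosA (mkRange start (N.toNat - start)) rem).map
        (fun c => c.foldl (fun basis index => basis.set index.toNat true)
                    (row ++ List.replicate (N.toNat - start) false)) := by
  induction rem with
  | zero => intro start row _ _; simp [genB, combosA_zero]
  | succ rem ih =>
      intro start row hrow hstart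
      by_cases hcase : N.toNat < start + (rem + 1)
      · -- not enough sites left: both sides empty
        have hgen : N.toNat - rem - start = 0 := by omega
        have hshort : (mkRange start (N.toNat - start)).length < rem + 1 := by
          simp [mkRange]; omega
        rw [combosA_nil_of_short _ _ hshort]
        show (List.range' start (N.toNat - rem - start)).flatMap _ = []
        rw [hgen]; rfl
      · rw [combosA_range, List.map_flatMap]
        have hsplit : List.range' start (N.toNat - start)
            = List.range' start (N.toNat - rem - start)
              ++ List.range' (start + (N.toNat - rem - start)) rem := by
          have h := @List.range'_append start (N.toNat - rem - start) rem 1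
          simp only [Nat.one_mul] at h
          rw [show N.toNat - start = (N.toNat - rem - start) + rem from by omega]
          exact h.symm
        rw [hsplit, List.flatMap_append]
        have htail : (List.range' (start + (N.toNat - rem - start)) rem).flatMap
            (fun i => ((combosA (mkRange (i + 1) (start + (N.toNat - start) - i - 1)) rem).map
               (fun c => (i : Int) :: c)).map
                 (fun c => c.foldl (fun basis index => basis.set index.toNat true)
                     (row ++ List.replicate (N.toNat - start) false))) = [] := by
          apply List.flatMap_eq_nil_iff.mpr
          intro i hi
          have hb := List.mem_range'_1.mp hi
          rw [combosA_nil_of_short]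
          · rfl
          · simp [mkRange]; omega
        rw [htail, List.append_nil]
        show (List.range' start (N.toNat - rem - start)).flatMap _ = _
        apply List.flatMap_congr
        intro i hi
        have hb := List.mem_range'_1.mp hi
        have hi1 : start ≤ i := hb.1
        have hi2 : i < N.toNat - rem := by omega
        rw [ih (i + 1) (row ++ List.replicate (i - start) false ++ [true])
              (by simp [hrow]; omega) (by omega)]
        rw [List.map_map]
        rw [show start + (N.toNat - start) - i - 1 = N.toNat - (i + 1) from by omega]
        apply List.map_congr_left
        intro c _
        show List.foldl _ _ c =
          List.foldl _ ((row ++ List.replicate (N.toNat - start) false).set (i : Int).toNat true) c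
        congr 1
        have hset : (row ++ List.replicate (N.toNat - start) false).set i true
            = (row ++ List.replicate (i - start) false ++ [true])
              ++ List.replicate (N.toNat - (i + 1)) false := by
          rw [List.set_append_right _ _ (by omega)]
          rw [hrow, replicate_set _ _ (by omega)]
          have : N.toNat - start - (i - start) - 1 = N.toNat - (i + 1) := by omega
          rw [this]
          simp
        simpa using hset.symm

-- A's foldl-append accumulation is List.map
theorem foldl_append_singleton {α β : Type} (f : α → β) (l : List α) (acc : List β) :
    l.foldl (fun s a => s ++ [f a]) acc = acc ++ l.map f := by
  induction l generalizing acc with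
  | nil => simp
  | cons x xs ih => simp [ih]

-- ---- B side: the iterative DFS equals genB ----

-- partial row of length i.toNat determined by the chosen stack
def padRow : List Int → Int → List Bool
  | [], i => List.replicate i.toNat false
  | c :: cs, i => padRow cs c ++ true :: List.replicate (i - c - 1).toNat false

-- pending output of a loop state: current subtree, then the resumed siblings of each stack frame
def KB (N : Int) : List Int → Nat → Int → List (List Bool)
  | [], rem, i => genB N i.toNat rem (padRow [] i)
  | c :: cs, rem, i => genB N i.toNat rem (padRow (c :: cs) i) ++ KB N cs (rem + 1) (c + 1)

-- chosen is a strictly decreasing stack of nonnegative sites below i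
def Asc : List Int → Int → Prop
  | [], _ => True
  | c :: cs, i => 0 ≤ c ∧ c < i ∧ Asc cs c

-- loop invariant
def InvB : List Int → Int → Int → Prop
  | chosen, remaining, i =>
      0 ≤ i ∧ 0 ≤ remaining ∧ Asc chosen i ∧
      (remaining = 0 → (chosen = [] ∧ i = 0) ∨ ∃ c cs, chosen = c :: cs ∧ i = c + 1)

-- exact remaining step count of a loop state
def stepsM (n : Nat) : List Int → Int → Int → Nat
  | [], rem, i => stepsB n i.toNat rem.toNat
  | c :: cs, rem, i => stepsB n i.toNat rem.toNat + stepsM n cs (rem + 1) (c + 1)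

theorem stepsB_pos (n s rm : Nat) : 1 ≤ stepsB n s rm := by
  unfold stepsB; split_ifs <;> omega

def stepsT (n : Nat) : List Int → Int → Nat
  | [], _ => 0
  | c :: cs, rem => stepsM n cs (rem + 1) (c + 1)

theorem stepsM_split (n : Nat) (chosen : List Int) (rem i : Int) :
    stepsM n chosen rem i = stepsB n i.toNat rem.toNat + stepsT n chosen rem := by
  cases chosen <;> simp [stepsM, stepsT]

theorem stepsM_pos (n : Nat) (chosen : List Int) (rem i : Int) :
    1 ≤ stepsM n chosen rem i := by
  rw [stepsM_split]
  have := stepsB_pos n i.toNat rem.toNat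
  omega

theorem asc_mono (cs : List Int) (b b' : Int) (h : Asc cs b) (hb : b ≤ b') : Asc cs b' := by
  cases cs with
  | nil => trivial
  | cons c cs =>
      obtain ⟨h1, h2, h3⟩ := h
      exact ⟨h1, by omega, h3⟩

-- peeling one candidate off genB's loop
theorem genB_peel (N : Int) (s rem : Nat) (row : List Bool) (h : s + rem + 1 ≤ N.toNat) :
    genB N s (rem + 1) row =
      genB N (s + 1) rem (row ++ [true]) ++ genB N (s + 1) (rem + 1) (row ++ [false]) := by
  show (List.range' s (N.toNat - rem - s)).flatMap _ = _
  rw [show N.toNat - rem - s = (N.toNat - rem - s - 1) + 1 from by omega, List.range'_succ,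
      List.flatMap_cons]
  congr 1
  · simp
  · show _ = (List.range' (s + 1) (N.toNat - rem - (s + 1))).flatMap _
    rw [show N.toNat - rem - (s + 1) = N.toNat - rem - s - 1 from by omega]
    apply List.flatMap_congr
    intro j hj
    have hb := List.mem_range'_1.mp hj
    congr 1
    rw [show j - s = (j - (s + 1)) + 1 from by omega, List.replicate_succ]
    simp

-- genB is empty when no candidate fits
theorem genB_empty (N : Int) (s rem : Nat) (row : List Bool) (h : N.toNat < s + rem + 1) :
    genB N s (rem + 1) row = [] := by
  show (List.range' s (N.toNat - rem - s)).flatMap _ = _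
  rw [show N.toNat - rem - s = 0 from by omega]
  rfl

-- padRow grows by one false as i advances past unchosen sites
theorem padRow_succ (chosen : List Int) (i : Int) (h0 : 0 ≤ i) (h : Asc chosen i) :
    padRow chosen (i + 1) = padRow chosen i ++ [false] := by
  cases chosen with
  | nil =>
      show List.replicate (i + 1).toNat false = List.replicate i.toNat false ++ [false]
      rw [show (i + 1).toNat = i.toNat + 1 from by omega, List.replicate_succ']
  | cons c cs =>
      show padRow cs c ++ true :: List.replicate (i + 1 - c - 1).toNat false
          = (padRow cs c ++ true :: List.replicate (i - c - 1).toNat false) ++ [false]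
      have hc := h.2.1
      rw [show (i + 1 - c - 1).toNat = (i - c - 1).toNat + 1 from by omega,
          List.replicate_succ']
      simp

-- the emitted Python row is the padded row plus its trailing falses
theorem rowOfB_fold (cs : List Int) (c : Int) (b : Int) (h : Asc (c :: cs) b) :
    (c :: cs).reverse.foldl
        (fun (st : List Bool × Int) x =>
          (st.1 ++ List.replicate (x - st.2 - 1).toNat false ++ [true], x))
        ([], -1)
      = (padRow cs c ++ [true], c) := by
  induction cs generalizing c b with
  | nil =>
      show ([] ++ List.replicate (c - (-1) - 1).toNat false ++ [true], c) = _
      simp [padRow]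
  | cons c' cs' ih =>
      have hrev : (c :: c' :: cs').reverse = (c' :: cs').reverse ++ [c] := by simp
      rw [hrev, List.foldl_append, ih c' c h.2.2]
      show (padRow cs' c' ++ [true] ++ List.replicate (c - c' - 1).toNat false ++ [true], c) = _
      show _ = (padRow cs' c' ++ true :: List.replicate (c - c' - 1).toNat false ++ [true], c)
      simp

theorem rowOfB_eq (N : Int) (chosen : List Int) (i : Int) (h0 : 0 ≤ i) (hA : Asc chosen i)
    (hshape : (chosen = [] ∧ i = 0) ∨ ∃ c cs, chosen = c :: cs ∧ i = c + 1) :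
    rowOfB N chosen = padRow chosen i ++ List.replicate (N.toNat - i.toNat) false := by
  rcases hshape with ⟨h1, h2⟩ | ⟨c, cs, h1, h2⟩
  · subst h1; subst h2
    show [] ++ List.replicate (N - (-1) - 1).toNat false = _
    simp [padRow]
  · subst h1; subst h2
    unfold rowOfB
    rw [rowOfB_fold cs c (c + 1) hA]
    show padRow cs c ++ [true] ++ List.replicate (N - c - 1).toNat false = _
    show _ = (padRow cs c ++ true :: List.replicate (c + 1 - c - 1).toNat false)
              ++ List.replicate (N.toNat - (c + 1).toNat) false
    have hc := hA.1
    have : (N - c - 1).toNat = N.toNat - (c + 1).toNat := by omega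
    simp [this]

-- main loop lemma: with enough fuel and the invariant, the loop produces exactly its pending output
theorem bloop_eq (N : Int) (fuel : Nat) :
    ∀ (chosen : List Int) (remaining i : Int) (acc : List (List Bool)),
      InvB chosen remaining i →
      stepsM N.toNat chosen remaining i ≤ fuel →
      bloop N fuel chosen remaining i acc = acc ++ KB N chosen remaining.toNat i := by
  induction fuel with
  | zero =>
      intro chosen remaining i acc _ hfuel
      have := stepsM_pos N.toNat chosen remaining i
      omega
  | succ fuel ih =>
      intro chosen remaining i acc hInv hfuel
      obtain ⟨hi0, hrem0, hAsc, hshape⟩ := hInv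
      by_cases hrz : remaining = 0
      · -- emit
        subst hrz
        have hrow := rowOfB_eq N chosen i hi0 hAsc (hshape rfl)
        cases chosen with
        | nil =>
            show acc ++ [rowOfB N []] = acc ++ KB N [] (0 : Int).toNat i
            show acc ++ [rowOfB N []] = acc ++ [padRow [] i ++ List.replicate (N.toNat - i.toNat) false]
            rw [hrow]
        | cons c cs =>
            show bloop N fuel cs 1 (c + 1) (acc ++ [rowOfB N (c :: cs)]) = _
            have hc0 := hAsc.1
            rw [ih cs 1 (c + 1) _
                ⟨by omega, by omega, asc_mono cs c (c + 1) hAsc.2.2 (by omega), by omega⟩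
                (by
                  have hs : stepsM N.toNat (c :: cs) 0 i
                      = stepsB N.toNat i.toNat 0 + stepsM N.toNat cs 1 (c + 1) := by
                    simp [stepsM]
                  have h1 : stepsB N.toNat i.toNat 0 = 1 := by unfold stepsB; simp
                  omega)]
            show acc ++ [rowOfB N (c :: cs)] ++ KB N cs (1 : Int).toNat (c + 1) = acc ++ KB N (c :: cs) (0 : Int).toNat i
            show _ = acc ++ (genB N i.toNat 0 (padRow (c :: cs) i) ++ KB N cs 1 (c + 1))
            show _ = acc ++ ([padRow (c :: cs) i ++ List.replicate (N.toNat - i.toNat) false] ++ KB N cs 1 (c + 1))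
            rw [hrow]
            simp
      · by_cases hcand : i ≤ N - remaining
        · -- append i to chosen
          have hrem1 : 1 ≤ remaining := by omega
          obtain ⟨rr, hrr⟩ : ∃ rr, remaining.toNat = rr + 1 := ⟨remaining.toNat - 1, by omega⟩
          have e1 : (i + 1).toNat = i.toNat + 1 := by omega
          have e2 : (remaining - 1).toNat = rr := by omega
          have hNi : i.toNat + rr + 1 ≤ N.toNat := by omega
          rw [show bloop N (fuel + 1) chosen remaining i acc
                = bloop N fuel (i :: chosen) (remaining - 1) (i + 1) acc from by
              show (if remaining = 0 then _ else if i ≤ N - remaining then _ else _) = _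
              rw [if_neg hrz, if_pos hcand]]
          rw [ih (i :: chosen) (remaining - 1) (i + 1) acc
              ⟨by omega, by omega, ⟨hi0, by omega, hAsc⟩, fun _ => Or.inr ⟨i, chosen, rfl, rfl⟩⟩
              (by
                -- one loop step is consumed
                have hunf : stepsB N.toNat i.toNat remaining.toNat
                    = 1 + stepsB N.toNat (i.toNat + 1) rr
                        + stepsB N.toNat (i.toNat + 1) remaining.toNat := by
                  rw [stepsB]
                  rw [if_neg (by omega), if_pos (by omega), hrr]
                  simp
                have hnew : stepsM N.toNat (i :: chosen) (remaining - 1) (i + 1)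
                    = stepsB N.toNat (i.toNat + 1) rr + stepsM N.toNat chosen remaining (i + 1) := by
                  show stepsB N.toNat (i + 1).toNat (remaining - 1).toNat
                      + stepsM N.toNat chosen (remaining - 1 + 1) (i + 1) = _
                  rw [e1, e2, show remaining - 1 + 1 = remaining from by omega]
                rw [hnew, stepsM_split N.toNat chosen remaining (i + 1), e1]
                rw [stepsM_split N.toNat chosen remaining i] at hfuel
                omega)]
          congr 1
          -- pending outputs coincide, by peeling genB
          have hpad : padRow (i :: chosen) (i + 1) = padRow chosen i ++ [true] := by
            show padRow chosen i ++ true :: List.replicate (i + 1 - i - 1).toNat false = _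
            norm_num
          have hpeel := genB_peel N i.toNat rr (padRow chosen i) hNi
          cases chosen with
          | nil =>
              show genB N (i + 1).toNat (remaining - 1).toNat (padRow (i :: []) (i + 1))
                    ++ genB N (i + 1).toNat ((remaining - 1).toNat + 1) (padRow [] (i + 1))
                  = genB N i.toNat remaining.toNat (padRow [] i)
              rw [e1, e2, hrr, hpad, padRow_succ [] i hi0 trivial, hpeel]
          | cons c cs =>
              show genB N (i + 1).toNat (remaining - 1).toNat (padRow (i :: c :: cs) (i + 1))
                    ++ (genB N (i + 1).toNat ((remaining - 1).toNat + 1) (padRow (c :: cs) (i + 1))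
                        ++ KB N cs ((remaining - 1).toNat + 1 + 1) (c + 1))
                  = genB N i.toNat remaining.toNat (padRow (c :: cs) i)
                    ++ KB N cs (remaining.toNat + 1) (c + 1)
              rw [e1, e2, hrr, hpad, padRow_succ (c :: cs) i hi0 hAsc, hpeel]
              simp
        · -- no candidate: backtrack
          have hgenil : ∀ row, genB N i.toNat remaining.toNat row = [] := by
            intro row
            rw [show remaining.toNat = (remaining.toNat - 1) + 1 from by omega]
            exact genB_empty N i.toNat (remaining.toNat - 1) row (by omega)
          cases chosen with
          | nil =>
              rw [show bloop N (fuel + 1) [] remaining i acc = acc from by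
                show (if remaining = 0 then _ else if i ≤ N - remaining then _ else _) = _
                rw [if_neg hrz, if_neg hcand]]
              show acc = acc ++ genB N i.toNat remaining.toNat (padRow [] i)
              rw [hgenil]; simp
          | cons c cs =>
              rw [show bloop N (fuel + 1) (c :: cs) remaining i acc
                    = bloop N fuel cs (remaining + 1) (c + 1) acc from by
                show (if remaining = 0 then _ else if i ≤ N - remaining then _ else _) = _
                rw [if_neg hrz, if_neg hcand]]
              have hc0 := hAsc.1
              rw [ih cs (remaining + 1) (c + 1) acc
                  ⟨by omega, by omega, asc_mono cs c (c + 1) hAsc.2.2 (by omega), by omega⟩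
                  (by
                    have hs : stepsM N.toNat (c :: cs) remaining i
                        = stepsB N.toNat i.toNat remaining.toNat
                          + stepsM N.toNat cs (remaining + 1) (c + 1) := by
                      simp [stepsM]
                    have h1 : 1 ≤ stepsB N.toNat i.toNat remaining.toNat := stepsB_pos _ _ _
                    omega)]
              show acc ++ KB N cs (remaining + 1).toNat (c + 1)
                  = acc ++ (genB N i.toNat remaining.toNat (padRow (c :: cs) i)
                            ++ KB N cs (remaining.toNat + 1) (c + 1))
              rw [hgenil, show (remaining + 1).toNat = remaining.toNat + 1 from by omega]
              simp

-- ===== VERDICT (by name: the statement is the Claim_ definition above) =====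
theorem spinless_basis_spec : Claim_equal_spinless_basis := by
  intro N r _ hr
  show spinless_basis N r = spinless_basis_alt N r
  unfold spinless_basis spinless_basis_alt
  have hlat : PySem.List.pyRange 0 N 1 = mkRange 0 N.toNat := by
    rw [PySem.List.pyRange_one]
    simp [mkRange, List.range'_eq_map_range]
  rw [hlat, foldl_append_singleton]
  rw [bloop_eq N (stepsB N.toNat 0 r.toNat) [] r 0 []
      ⟨le_refl 0, hr, trivial, fun h => Or.inl ⟨rfl, rfl⟩⟩
      (by simp [stepsM])]
  show _ = [] ++ KB N [] r.toNat 0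
  show _ = [] ++ genB N (0 : Int).toNat r.toNat (padRow [] 0)
  rw [show ((0 : Int).toNat) = 0 from rfl, show padRow [] 0 = ([] : List Bool) from rfl]
  rw [genB_eq r.toNat N 0 [] rfl (Nat.zero_le _)]
  simp
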